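-- pv_equiv track=rewrite | github.com/nomenas/scripts | unify_names.py | normalise_name
-- ===== SOURCE A (Python) =====
-- def normalise_name(test_definition):
--     returnValue = ""
--     inTestName = False
--     underscoreBefore = False
--     underscoreTwoBefore = False
--     isFirst = True
--     for ch in test_definition:
--         new_ch = ch
--         if (not inTestName and ch == ','):
--             inTestName = True
--         elif (inTestName):
--             if (isFirst and ch != ' '):
--                 new_ch = ch.upper()
--                 isFirst = False
--             elif (underscoreTwoBefore and underscoreBefore and ch != '_'):
--                 new_ch = ch.upper()
--             elif (underscoreBefore and ch != '_'):
--                 returnValue = returnValue[:len(returnValue) - 1]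
--                 new_ch = ch.upper()
--
--         underscoreTwoBefore = underscoreBefore
--         underscoreBefore = ch == '_'
--         returnValue = returnValue + new_ch
--
--     return returnValue
-- ===== SOURCE B (Python) =====
-- def normalise_name(test_definition):
--     prefix, comma, suffix = test_definition.partition(',')
--     if not comma:
--         return test_definition
--     chars = list(suffix)
--     for i, c in enumerate(chars):
--         if c != ' ':
--             chars[i] = c.upper()
--             break
--     out = []
--     i = 0
--     n = len(chars)
--     while i < n:
--         c = chars[i]
--         if c != '_':
--             out.append(c)
--             i += 1
--             continue
--         j = i
--         while j < n and chars[j] == '_':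
--             j += 1
--         if j < n:
--             if j - i >= 2:
--                 out.extend(chars[i:j])
--             out.append(chars[j].upper())
--             i = j + 1
--         else:
--             out.extend(chars[i:j])
--             i = j
--     return prefix + ',' + ''.join(out)
-- ===== Notes on version B (the rewrite author's own statement) =====
-- stated objective: simpler
-- what changed: A's single pass with five pieces of mutable state (inTestName, underscoreBefore, underscoreTwoBefore, isFirst, and backtracking deletion from the output) is replaced by a split at the first comma via str.partition, one pass that uppercases the first non-space character of the suffix, and a scan over whole underscore runs (a lone underscore is dropped and its follower uppercased; runs of length >= 2 are kept). B also avoids A's quadratic repeated string concatenation and slicing by assembling the output once.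
import Mathlib
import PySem

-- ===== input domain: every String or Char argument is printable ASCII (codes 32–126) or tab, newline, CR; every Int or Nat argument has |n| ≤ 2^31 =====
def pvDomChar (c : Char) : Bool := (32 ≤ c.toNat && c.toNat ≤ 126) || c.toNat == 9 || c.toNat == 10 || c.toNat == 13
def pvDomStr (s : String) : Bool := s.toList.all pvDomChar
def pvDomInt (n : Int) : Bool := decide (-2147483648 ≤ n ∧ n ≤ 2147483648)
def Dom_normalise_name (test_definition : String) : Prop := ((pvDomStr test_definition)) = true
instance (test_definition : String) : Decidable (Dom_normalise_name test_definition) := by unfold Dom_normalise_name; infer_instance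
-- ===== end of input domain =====

-- B replaces A's five-flag character state machine by a split at the first comma,
-- a first-non-space uppercase pass, and an underscore-run scan (objective: simpler).


-- ===== PORT A =====
-- State: (returnValue, inTestName, underscoreBefore, underscoreTwoBefore, isFirst);
-- returnValue kept as List Char (Python string concatenation); returnValue[:len-1] = dropLast.
def pvStepA (st : List Char × Bool × Bool × Bool × Bool) (ch : Char) :
    List Char × Bool × Bool × Bool × Bool :=
  let rv := st.1
  let inTestName := st.2.1
  let ub := st.2.2.1
  let u2b := st.2.2.2.1
  let isFirst := st.2.2.2.2
  -- (new returnValue already including new_ch, new inTestName, new isFirst)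
  let res : List Char × Bool × Bool :=
    if !inTestName && ch == ',' then (rv ++ [ch], true, isFirst)
    else if inTestName then
      if isFirst && ch != ' ' then (rv ++ [PySem.Chars.upperChar ch], inTestName, false)
      else if u2b && ub && ch != '_' then (rv ++ [PySem.Chars.upperChar ch], inTestName, isFirst)
      else if ub && ch != '_' then (rv.dropLast ++ [PySem.Chars.upperChar ch], inTestName, isFirst)
      else (rv ++ [ch], inTestName, isFirst)
    else (rv ++ [ch], inTestName, isFirst)
  (res.1, res.2.1, ch == '_', ub, res.2.2)

def normalise_name (test_definition : String) : String :=
  String.ofList (test_definition.toList.foldl pvStepA ([], false, false, false, true)).1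

-- ===== PORT B =====
-- Source B's first-break loop: uppercase the first non-space character.
def pvUpperFirst : List Char → List Char
  | [] => []
  | c :: t => if c == ' ' then c :: pvUpperFirst t else PySem.Chars.upperChar c :: t

-- Source B's while loop over underscore runs: drop a lone '_' before a non-underscore
-- and uppercase the follower; keep runs of length ≥ 2 (follower still uppercased).
def pvRuns : List Char → List Char
  | [] => []
  | c :: t =>
    if c = '_' then
      let us := List.takeWhile (fun x => x = '_') (c :: t)
      match h : List.dropWhile (fun x => x = '_') (c :: t) with
      | [] => us
      | d :: tail => (if 2 ≤ us.length then us else []) ++ PySem.Chars.upperChar d :: pvRuns tail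
    else c :: pvRuns t
termination_by l => l.length
decreasing_by
  · have := List.length_dropWhile_le (p := fun x => x = '_') (l := c :: t)
    rw [h] at this; simp at this ⊢; omega
  · simp

-- test_definition.partition(',') = (chars before the first comma, the comma if any, the rest)
def normalise_name_alt (test_definition : String) : String :=
  match List.dropWhile (fun x => !(x == ',')) test_definition.toList with
  | [] => test_definition
  | _ :: suffix =>
      String.ofList (List.takeWhile (fun x => !(x == ',')) test_definition.toList
        ++ ',' :: pvRuns (pvUpperFirst suffix))

-- ===== PRECONDITION & SPEC =====
def Spec_normalise_name (test_definition : String) (out : String) : Prop := out = normalise_name_alt test_definition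
instance (test_definition : String) (out : String) : Decidable (Spec_normalise_name test_definition out) := by unfold Spec_normalise_name; infer_instance

-- ===== CLAIM (what is proved, stated in full; the proofs are below) =====
def Claim_equal_normalise_name : Prop := ∀ (test_definition : String), Dom_normalise_name test_definition → Spec_normalise_name test_definition (normalise_name test_definition)

-- ===== LEMMAS AND PROOFS =====

-- Run-based reformulation of A's main loop: `r` pending (not yet emitted) underscores.
def pvRunAux : Nat → List Char → List Char
  | r, [] => List.replicate r '_'
  | r, c :: t =>
    if c = '_' then pvRunAux (r + 1) t
    else if r = 0 then c :: pvRunAux 0 t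
    else if r = 1 then PySem.Chars.upperChar c :: pvRunAux 0 t
    else List.replicate r '_' ++ PySem.Chars.upperChar c :: pvRunAux 0 t

theorem pvOfNatToNat (n : Nat) (h : n < 0xd800) : (Char.ofNat n).toNat = n := by
  unfold Char.ofNat
  rw [dif_pos (Or.inl h)]
  rfl

theorem pvUpper_ne_underscore (c : Char) (h : c ≠ '_') : PySem.Chars.upperChar c ≠ '_' := by
  unfold PySem.Chars.upperChar PySem.Chars.islower
  split_ifs with h1
  · simp only [Bool.and_eq_true, decide_eq_true_eq] at h1
    intro he
    have h2 := congrArg Char.toNat he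
    have hle : ('a' : Char).toNat ≤ c.toNat := h1.1
    have hge : c.toNat ≤ ('z' : Char).toNat := h1.2
    simp only [show ('a' : Char).toNat = 97 from rfl, show ('z' : Char).toNat = 122 from rfl]
      at hle hge
    rw [pvOfNatToNat _ (by omega)] at h2
    simp only [show ('_' : Char).toNat = 95 from rfl] at h2
    omega
  · exact h

theorem pvRunAux_replicate : ∀ (k : Nat) (r : Nat) (t : List Char),
    pvRunAux r (List.replicate k '_' ++ t) = pvRunAux (r + k) t
  | 0, r, t => by simp
  | k + 1, r, t => by
    simp only [List.replicate_succ, List.cons_append]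
    rw [pvRunAux, if_pos rfl, pvRunAux_replicate k (r + 1) t]
    rw [show r + 1 + k = r + (k + 1) from by omega]

theorem pvRunAux_replicate_nil (r k : Nat) :
    pvRunAux r (List.replicate k '_') = List.replicate (r + k) '_' := by
  rw [← List.append_nil (List.replicate k '_'), pvRunAux_replicate, pvRunAux]

theorem pvRuns_nil : pvRuns [] = [] := by simp [pvRuns]

theorem pvRuns_cons_ne (c : Char) (t : List Char) (h : c ≠ '_') :
    pvRuns (c :: t) = c :: pvRuns t := by
  rw [pvRuns]
  simp [h]

theorem pvRuns_cons_us (t : List Char) (d : Char) (tail : List Char)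
    (hd : List.dropWhile (fun x => decide (x = '_')) ('_' :: t) = d :: tail) :
    pvRuns ('_' :: t) =
      (if 2 ≤ (List.takeWhile (fun x => decide (x = '_')) ('_' :: t)).length
        then List.takeWhile (fun x => decide (x = '_')) ('_' :: t) else [])
        ++ PySem.Chars.upperChar d :: pvRuns tail := by
  rw [pvRuns.eq_def]
  dsimp only
  rw [if_pos rfl]
  split
  · next h2 => rw [hd] at h2; cases h2
  · next d' tail' h2 => rw [hd] at h2; cases h2; rfl

theorem pvRuns_cons_us_nil (t : List Char)
    (hd : List.dropWhile (fun x => decide (x = '_')) ('_' :: t) = []) :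
    pvRuns ('_' :: t) = List.takeWhile (fun x => decide (x = '_')) ('_' :: t) := by
  rw [pvRuns.eq_def]
  dsimp only
  rw [if_pos rfl]
  split
  · rfl
  · next d' tail' h2 => rw [hd] at h2; cases h2

theorem pvRuns_eq : ∀ l : List Char, pvRuns l = pvRunAux 0 l
  | [] => by simp [pvRuns, pvRunAux]
  | c :: t => by
    by_cases hc : c = '_'
    · subst hc
      have hrepl : List.takeWhile (fun x => decide (x = '_')) ('_' :: t)
          = List.replicate (List.takeWhile (fun x => decide (x = '_')) ('_' :: t)).length '_' := by
        apply List.eq_replicate_of_mem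
        intro b hb
        simpa using List.mem_takeWhile_imp hb
      have hsplit := List.takeWhile_append_dropWhile (p := fun x => decide (x = '_')) (l := '_' :: t)
      have hk : 1 ≤ (List.takeWhile (fun x => decide (x = '_')) ('_' :: t)).length := by
        simp
      cases hd : List.dropWhile (fun x => decide (x = '_')) ('_' :: t) with
      | nil =>
        rw [pvRuns_cons_us_nil t hd]
        rw [hd, List.append_nil] at hsplit
        conv_rhs => rw [← hsplit, hrepl]
        rw [pvRunAux_replicate_nil, Nat.zero_add, ← hrepl]
      | cons d tail =>
        have hdne : d ≠ '_' := by
          have h3 := List.head?_dropWhile_not (p := fun x => decide (x = '_')) ('_' :: t)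
          rw [hd] at h3
          simpa using h3
        have htail : tail.length < ('_' :: t).length := by
          have hlen := List.length_dropWhile_le (p := fun x => decide (x = '_')) (l := '_' :: t)
          rw [hd] at hlen
          simp at hlen ⊢
          omega
        rw [pvRuns_cons_us t d tail hd]
        rw [hd] at hsplit
        conv_rhs => rw [← hsplit, hrepl]
        rw [pvRunAux_replicate, Nat.zero_add]
        rw [pvRuns_eq tail]
        rw [pvRunAux, if_neg hdne]
        rcases Nat.lt_or_ge (List.takeWhile (fun x => decide (x = '_')) ('_' :: t)).length 2 with h2 | h2
        · have h1 : (List.takeWhile (fun x => decide (x = '_')) ('_' :: t)).length = 1 := by omega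
          rw [h1]
          norm_num
        · rw [if_pos h2, ← hrepl]
          rw [if_neg (show ¬((List.takeWhile (fun x => decide (x = '_')) ('_' :: t)).length = 1) from by omega)]
          rw [if_neg (show ¬((List.takeWhile (fun x => decide (x = '_')) ('_' :: t)).length = 0) from by omega)]
    · rw [pvRuns_cons_ne c t hc, pvRuns_eq t, pvRunAux, if_neg hc, if_pos rfl]
termination_by l => l.length
decreasing_by
  · simp only [List.length_cons] at htail ⊢
    omega
  · simp

theorem pvStepA_main : ∀ (l acc : List Char) (r : Nat) (u2b : Bool),
    (1 ≤ r → u2b = decide (2 ≤ r)) →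
    (List.foldl pvStepA (acc ++ List.replicate r '_', true, decide (1 ≤ r), u2b, false) l).1
      = acc ++ pvRunAux r l
  | [], acc, r, u2b, h => by simp [pvRunAux]
  | c :: t, acc, r, u2b, h => by
    rw [List.foldl_cons]
    by_cases hc : c = '_'
    · subst hc
      have hstep : pvStepA (acc ++ List.replicate r '_', true, decide (1 ≤ r), u2b, false) '_'
          = (acc ++ List.replicate (r + 1) '_', true, decide (1 ≤ r + 1), decide (1 ≤ r), false) := by
        simp [pvStepA, List.replicate_succ' (n := r)]
      rw [hstep, pvStepA_main t acc (r + 1) (decide (1 ≤ r))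
        (fun _ => by rw [decide_eq_decide]; omega)]
      rw [pvRunAux, if_pos rfl]
    · rcases r with _ | _ | r
      · have hstep : pvStepA (acc ++ List.replicate 0 '_', true, decide (1 ≤ 0), u2b, false) c
            = ((acc ++ [c]) ++ List.replicate 0 '_', true, decide ((1:Nat) ≤ 0), false, false) := by
          simp [pvStepA, hc]
        rw [hstep, pvStepA_main t (acc ++ [c]) 0 false (fun h1 => absurd h1 (by omega))]
        rw [pvRunAux, if_neg hc, if_pos rfl]
        simp
      · have hu : u2b = false := by simpa using h (by omega)
        subst hu
        have hstep : pvStepA (acc ++ List.replicate 1 '_', true, decide (1 ≤ 1), false, false) c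
            = ((acc ++ [PySem.Chars.upperChar c]) ++ List.replicate 0 '_', true,
               decide ((1:Nat) ≤ 0), true, false) := by
          simp [pvStepA, hc]
        rw [hstep, pvStepA_main t (acc ++ [PySem.Chars.upperChar c]) 0 true
          (fun h1 => absurd h1 (by omega))]
        rw [pvRunAux, if_neg hc]
        simp
      · have hu : u2b = true := by simpa using h (by omega)
        subst hu
        have hstep : pvStepA (acc ++ List.replicate (r + 2) '_', true, decide (1 ≤ r + 2), true, false) c
            = ((acc ++ List.replicate (r + 2) '_' ++ [PySem.Chars.upperChar c]) ++ List.replicate 0 '_',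
               true, decide ((1:Nat) ≤ 0), true, false) := by
          simp [pvStepA, hc]
        rw [hstep, pvStepA_main t (acc ++ List.replicate (r + 2) '_' ++ [PySem.Chars.upperChar c]) 0 true
          (fun h1 => absurd h1 (by omega))]
        rw [pvRunAux, if_neg hc, if_neg (by omega), if_neg (by omega)]
        simp

theorem pvStepA_first : ∀ (l acc : List Char) (u2b : Bool),
    (List.foldl pvStepA (acc, true, false, u2b, true) l).1 = acc ++ pvRuns (pvUpperFirst l)
  | [], acc, u2b => by simp [pvUpperFirst, pvRuns_nil]
  | c :: t, acc, u2b => by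
    rw [List.foldl_cons]
    by_cases hsp : c = ' '
    · subst hsp
      have hstep : pvStepA (acc, true, false, u2b, true) ' '
          = (acc ++ [' '], true, false, false, true) := by
        simp [pvStepA]
      rw [hstep, pvStepA_first t (acc ++ [' ']) false]
      rw [show pvUpperFirst (' ' :: t) = ' ' :: pvUpperFirst t from by simp [pvUpperFirst]]
      rw [pvRuns_cons_ne _ _ (by decide)]
      simp
    · have hupf : pvUpperFirst (c :: t) = PySem.Chars.upperChar c :: t := by
        simp [pvUpperFirst, hsp]
      by_cases hc : c = '_'
      · subst hc
        have hstep : pvStepA (acc, true, false, u2b, true) '_'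
            = (acc ++ List.replicate 1 '_', true, decide ((1:Nat) ≤ 1), false, false) := by
          simp [pvStepA, PySem.Chars.upperChar, PySem.Chars.islower]
        rw [hstep, pvStepA_main t acc 1 false (fun _ => by decide)]
        rw [hupf, show PySem.Chars.upperChar '_' = '_' from rfl]
        rw [pvRuns_eq, pvRunAux, if_pos rfl]
      · have hstep : pvStepA (acc, true, false, u2b, true) c
            = ((acc ++ [PySem.Chars.upperChar c]) ++ List.replicate 0 '_', true,
               decide ((1:Nat) ≤ 0), false, false) := by
          simp [pvStepA, hsp, hc]
        rw [hstep, pvStepA_main t (acc ++ [PySem.Chars.upperChar c]) 0 false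
          (fun h1 => absurd h1 (by omega))]
        rw [hupf, pvRuns_cons_ne _ _ (pvUpper_ne_underscore c hc), pvRuns_eq]
        simp

theorem pvStepA_pre : ∀ (l acc : List Char) (ub u2b : Bool),
    (List.foldl pvStepA (acc, false, ub, u2b, true) l).1 =
      (match List.dropWhile (fun x => !(x == ',')) l with
       | [] => acc ++ l
       | _ :: suffix => acc ++ (List.takeWhile (fun x => !(x == ',')) l ++ ',' :: pvRuns (pvUpperFirst suffix)))
  | [], acc, ub, u2b => by simp
  | c :: t, acc, ub, u2b => by
    rw [List.foldl_cons]
    by_cases hc : c = ','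
    · subst hc
      have hstep : pvStepA (acc, false, ub, u2b, true) ','
          = (acc ++ [','], true, false, ub, true) := by
        simp [pvStepA]
      rw [hstep, pvStepA_first t (acc ++ [',']) ub]
      simp
    · have hstep : pvStepA (acc, false, ub, u2b, true) c
          = (acc ++ [c], false, c == '_', ub, true) := by
        simp [pvStepA, hc]
      rw [hstep, pvStepA_pre t (acc ++ [c]) (c == '_') ub]
      rw [List.dropWhile_cons, List.takeWhile_cons]
      rw [if_pos (by simpa using hc), if_pos (by simpa using hc)]
      cases hd : List.dropWhile (fun x => !(x == ',')) t with
      | nil => simp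
      | cons d suffix => simp

-- ===== VERDICT (by name: the statement is the Claim_ definition above) =====
theorem normalise_name_spec : Claim_equal_normalise_name := by
  intro s _hDom
  unfold Spec_normalise_name normalise_name normalise_name_alt
  have h := pvStepA_pre s.toList [] false false
  cases hd : List.dropWhile (fun x => !(x == ',')) s.toList with
  | nil =>
    simp at h
    simp [h, hd]
  | cons d suffix =>
    simp at h
    simp [h, hd]
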